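-- pv_equiv track=rewrite | github.com/chystarr/advent22 | day6/day6.py | chars_processed
-- ===== SOURCE A (Python) =====
-- def chars_processed(datastream):
--     def all_unique(chars):
--         charset = set()
--         for c in chars:
--             if c in charset:
--                 return False
--             charset.add(c)
--         return True
--
--     chars = list(datastream[:3])
--     for i in range(3, len(datastream)):
--         chars.append(datastream[i])
--         if all_unique(chars):
--             return i + 1
--         del(chars[0])
-- ===== SOURCE B (Python) =====
-- def chars_processed(datastream):
--     # Two staged passes over the stream instead of re-checking each window:
--     # Pass 1: prev[k] = index of the previous occurrence of datastream[k], or -1,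
--     # built with a last-occurrence dictionary.
--     last = {}
--     prev = []
--     for k, c in enumerate(datastream):
--         prev.append(last.get(c, -1))
--         last[c] = k
--     # Pass 2: the window [i-3, i] is all-unique iff none of its last three
--     # characters has its previous occurrence inside the window.
--     for i in range(3, len(datastream)):
--         if prev[i - 2] < i - 3 and prev[i - 1] < i - 3 and prev[i] < i - 3:
--             return i + 1
-- ===== Notes on version B (the rewrite author's own statement) =====
-- stated objective: alternative
-- what changed: Replaces the per-window list mutation plus a freshly built set per window by two staged passes: a last-occurrence dictionary builds a previous-occurrence index array, then a scan finds the first index whose last three characters all have their previous occurrence outside the window.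
import Mathlib
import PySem

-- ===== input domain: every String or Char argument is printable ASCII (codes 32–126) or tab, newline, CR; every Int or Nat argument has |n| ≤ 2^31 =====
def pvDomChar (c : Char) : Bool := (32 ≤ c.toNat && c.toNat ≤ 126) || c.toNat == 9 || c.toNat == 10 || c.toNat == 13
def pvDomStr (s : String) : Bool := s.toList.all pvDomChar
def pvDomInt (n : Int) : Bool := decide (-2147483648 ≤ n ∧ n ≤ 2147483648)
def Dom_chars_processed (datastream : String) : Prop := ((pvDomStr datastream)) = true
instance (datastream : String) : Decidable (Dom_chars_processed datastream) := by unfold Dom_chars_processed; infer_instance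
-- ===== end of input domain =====

-- B replaces A's sliding window list with a per-window set rebuild by two staged passes:
-- a last-occurrence dictionary builds a previous-occurrence index array, then a scan of
-- that array finds the first all-unique window (objective: alternative algorithm, same cost).

-- ===== PORT A =====
-- A's inner helper all_unique: scan chars, growing a set
def pvAllUniqueAux (chars : List Char) (charset : PySem.Set Char) : Bool :=
  match chars with
  | [] => true
  | c :: cs => if PySem.Set.contains charset c then false else pvAllUniqueAux cs (PySem.Set.add charset c)

def pvAllUnique (chars : List Char) : Bool := pvAllUniqueAux chars PySem.Set.empty

-- the for-loop over range(3, len) with early return, window list `chars` as state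
def pvLoopA (l : List Char) (chars : List Char) (i : Nat) : Option Int :=
  if i < l.length then
    match PySem.List.pyGet? l (i : Int) with
    | none => none  -- unreachable: i is in range
    | some d =>
      let chars2 := chars ++ [d]
      if pvAllUnique chars2 then some ((i : Int) + 1)
      else pvLoopA l (chars2.drop 1) (i + 1)
  else none
termination_by l.length - i

def chars_processed (datastream : String) : Option Int :=
  let l := datastream.toList
  pvLoopA l (PySem.List.slice l none (some ((3 : Nat) : Int))) 3

-- ===== PORT B =====
-- prev[i] always accessed in range in pass 2; the 0 default is unreachable
def pvGetI (xs : List Int) (j : Int) : Int :=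
  match PySem.List.pyGet? xs j with
  | some v => v
  | none => 0

-- pass 1: build the previous-occurrence array with a last-occurrence dict
def pvPass1 : List Char → Nat → PySem.Dict Char Int → List Int
  | [], _, _ => []
  | c :: cs, k, last =>
      PySem.Dict.getD last c (-1) :: pvPass1 cs (k + 1) (PySem.Dict.insert last c (k : Int))

-- pass 2: first i ≥ 3 whose last three chars all have prev occurrence before i-3
def pvPass2 (prev : List Int) (n : Nat) (i : Nat) : Option Int :=
  if i < n then
    if pvGetI prev ((i : Int) - 2) < (i : Int) - 3 ∧ pvGetI prev ((i : Int) - 1) < (i : Int) - 3 ∧ pvGetI prev (i : Int) < (i : Int) - 3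
    then some ((i : Int) + 1)
    else pvPass2 prev n (i + 1)
  else none
termination_by n - i

def chars_processed_alt (datastream : String) : Option Int :=
  let l := datastream.toList
  pvPass2 (pvPass1 l 0 PySem.Dict.empty) l.length 3

-- ===== PRECONDITION & SPEC =====
def Spec_chars_processed (datastream : String) (out : Option Int) : Prop := out = chars_processed_alt datastream
instance (datastream : String) (out : Option Int) : Decidable (Spec_chars_processed datastream out) := by unfold Spec_chars_processed; infer_instance

-- ===== CLAIM (what is proved, stated in full; the proofs are below) =====
def Claim_equal_chars_processed : Prop := ∀ (datastream : String), Dom_chars_processed datastream → Spec_chars_processed datastream (chars_processed datastream)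

-- ===== LEMMAS AND PROOFS =====

-- invariant of pass 1's dict: getD c (-1) is ≥ t iff c occurs in the consumed prefix at index ≥ t
def pvDInv (p : List Char) (d : PySem.Dict Char Int) : Prop :=
  ∀ (c : Char) (t : Nat), ((t : Int) ≤ d.getD c (-1)) ↔ ∃ a, t ≤ a ∧ ∃ h : a < p.length, p[a] = c

theorem pvDInv_empty : pvDInv [] PySem.Dict.empty := by
  intro c t
  simp [PySem.Dict.getD_empty]
  omega

theorem pvDInv_step (p : List Char) (d : PySem.Dict Char Int) (c : Char)
    (hd : pvDInv p d) : pvDInv (p ++ [c]) (d.insert c (p.length : Int)) := by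
  intro c' t
  rw [PySem.Dict.getD_insert]
  by_cases hc : c' = c
  · subst hc
    rw [if_pos rfl]
    constructor
    · intro ht
      exact ⟨p.length, by exact_mod_cast ht, by simp, by simp⟩
    · rintro ⟨a, hta, ha, _⟩
      have h1 : a ≤ p.length := by simp at ha; omega
      exact_mod_cast le_trans hta h1
  · rw [if_neg hc, hd c' t]
    constructor
    · rintro ⟨a, hta, ha, hpa⟩
      exact ⟨a, hta, by simp; omega, by rw [List.getElem_append_left ha]; exact hpa⟩
    · rintro ⟨a, hta, ha, hpa⟩
      have ha' : a < p.length := by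
        by_contra h
        have : a = p.length := by simp at ha; omega
        subst this
        rw [List.getElem_append_right (by omega)] at hpa
        simp at hpa
        exact hc hpa.symm
      exact ⟨a, hta, ha', by rw [List.getElem_append_left ha'] at hpa; exact hpa⟩

theorem pvPass1_length : ∀ (cs : List Char) (k : Nat) (d : PySem.Dict Char Int),
    (pvPass1 cs k d).length = cs.length := by
  intro cs
  induction cs with
  | nil => intro k d; rfl
  | cons c cs ih => intro k d; simp [pvPass1, ih]

theorem pvPass1_get : ∀ (cs p : List Char) (d : PySem.Dict Char Int), pvDInv p d →
    ∀ (j : Nat) (hj : j < cs.length) (t : Nat),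
      ((t : Int) ≤ (pvPass1 cs p.length d).getD j 0) ↔
      ∃ a, t ≤ a ∧ ∃ h : a < p.length + j,
        (p ++ cs)[a]'(by simp only [List.length_append]; omega) = cs[j] := by
  intro cs
  induction cs with
  | nil => intro p d _ j hj; simp at hj
  | cons c cs ih =>
    intro p d hd j hj t
    match j with
    | 0 =>
      simp only [pvPass1, List.getD_cons_zero, List.getElem_cons_zero, Nat.add_zero]
      rw [hd c t]
      constructor
      · rintro ⟨a, hta, ha, hpa⟩
        exact ⟨a, hta, ha, by rw [List.getElem_append_left ha]; exact hpa⟩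
      · rintro ⟨a, hta, ha, hpa⟩
        exact ⟨a, hta, ha, by rw [List.getElem_append_left ha] at hpa; exact hpa⟩
    | j' + 1 =>
      have hd' := pvDInv_step p d c hd
      have hlen : p.length + 1 = (p ++ [c]).length := by simp
      have := ih (p ++ [c]) (d.insert c (p.length : Int)) hd' j' (by simpa using hj) t
      simp only [pvPass1, List.getD_cons_succ]
      rw [hlen, this]
      constructor
      · rintro ⟨a, hta, ha, hpa⟩
        refine ⟨a, hta, by simp at ha ⊢; omega, ?_⟩
        simpa [List.append_assoc] using hpa
      · rintro ⟨a, hta, ha, hpa⟩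
        refine ⟨a, hta, by simp at ha ⊢; omega, ?_⟩
        simpa [List.append_assoc] using hpa

-- specialisation of pass 1 to the whole stream: prev[j] ≥ t iff l[j] re-occurs at some a ∈ [t, j)
theorem pvPrev_spec (l : List Char) (j : Nat) (hj : j < l.length) (t : Nat) :
    ((t : Int) ≤ (pvPass1 l 0 PySem.Dict.empty).getD j 0) ↔
    ∃ a, t ≤ a ∧ ∃ h : a < j, l[a] = l[j] := by
  have := pvPass1_get l [] PySem.Dict.empty pvDInv_empty j hj t
  simpa using this

-- pvGetI in range reads getD
theorem pvGetI_natCast (xs : List Int) (j : Nat) (hj : j < xs.length) :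
    pvGetI xs ((j : Nat) : Int) = xs.getD j 0 := by
  simp [pvGetI, PySem.List.pyGet?_natCast, List.getElem?_eq_getElem hj, List.getD]

-- A's 4-element uniqueness test as a Prop
theorem pvAllUnique_four_iff (w x y z : Char) :
    pvAllUnique [w, x, y, z] = true ↔
      (w ≠ x ∧ w ≠ y ∧ x ≠ y ∧ w ≠ z ∧ x ≠ z ∧ y ≠ z) := by
  simp [pvAllUnique, pvAllUniqueAux, PySem.Set.empty, PySem.Set.contains, PySem.Set.add]
  cases hxw : x == w <;> cases hyw : y == w <;> cases hyx : y == x <;>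
    cases hzw : z == w <;> cases hzx : z == x <;> cases hzy : z == y <;>
      simp_all [beq_iff_eq] <;> tauto

-- the per-window tests coincide
theorem pvCond_equiv (l : List Char) (m : Nat) (h : m + 3 < l.length) :
    pvAllUnique [l[m], l[m + 1], l[m + 2], l[m + 3]] = true ↔
      (pvGetI (pvPass1 l 0 PySem.Dict.empty) (((m + 1 : Nat)) : Int) < (m : Int) ∧
       pvGetI (pvPass1 l 0 PySem.Dict.empty) (((m + 2 : Nat)) : Int) < (m : Int) ∧
       pvGetI (pvPass1 l 0 PySem.Dict.empty) (((m + 3 : Nat)) : Int) < (m : Int)) := by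
  have hlen := pvPass1_length l 0 PySem.Dict.empty
  rw [pvGetI_natCast _ _ (by omega), pvGetI_natCast _ _ (by omega), pvGetI_natCast _ _ (by omega)]
  have h1 := pvPrev_spec l (m + 1) (by omega) m
  have h2 := pvPrev_spec l (m + 2) (by omega) m
  have h3 := pvPrev_spec l (m + 3) (by omega) m
  rw [pvAllUnique_four_iff]
  constructor
  · rintro ⟨hwx, hwy, hxy, hwz, hxz, hyz⟩
    refine ⟨?_, ?_, ?_⟩
    · by_contra hle
      obtain ⟨a, hta, ha, hpa⟩ := h1.mp (by omega)
      have : a = m := by omega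
      subst this; exact hwx hpa
    · by_contra hle
      obtain ⟨a, hta, ha, hpa⟩ := h2.mp (by omega)
      rcases (by omega : a = m ∨ a = m + 1) with h' | h' <;> subst h'
      · exact hwy hpa
      · exact hxy hpa
    · by_contra hle
      obtain ⟨a, hta, ha, hpa⟩ := h3.mp (by omega)
      rcases (by omega : a = m ∨ a = m + 1 ∨ a = m + 2) with h' | h' | h' <;> subst h'
      · exact hwz hpa
      · exact hxz hpa
      · exact hyz hpa
  · rintro ⟨hb1, hb2, hb3⟩
    have n1 : ¬ ∃ a, m ≤ a ∧ ∃ h : a < m + 1, l[a] = l[m + 1] := fun he => by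
      have := h1.mpr he; omega
    have n2 : ¬ ∃ a, m ≤ a ∧ ∃ h : a < m + 2, l[a] = l[m + 2] := fun he => by
      have := h2.mpr he; omega
    have n3 : ¬ ∃ a, m ≤ a ∧ ∃ h : a < m + 3, l[a] = l[m + 3] := fun he => by
      have := h3.mpr he; omega
    push_neg at n1 n2 n3
    exact ⟨n1 m le_rfl (by omega), n2 m le_rfl (by omega), fun hxy => n2 (m+1) (by omega) (by omega) hxy,
      n3 m le_rfl (by omega), fun hxz => n3 (m+1) (by omega) (by omega) hxz,
      fun hyz => n3 (m+2) (by omega) (by omega) hyz⟩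

-- main loop invariant: with the window full, A's loop equals B's pass 2
theorem pvLoop_agree (l : List Char) : ∀ (k m : Nat), l.length - (m + 3) ≤ k →
    ∀ (hm : m + 2 < l.length),
    pvLoopA l [l[m], l[m + 1], l[m + 2]] (m + 3) =
      pvPass2 (pvPass1 l 0 PySem.Dict.empty) l.length (m + 3) := by
  intro k
  induction k with
  | zero =>
    intro m hk hm
    have hle : l.length ≤ m + 3 := by omega
    rw [pvLoopA, pvPass2]
    simp [pvPass1_length, Nat.not_lt.mpr hle]
  | succ k ih =>
    intro m hk hm
    by_cases hlt : m + 3 < l.length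
    · rw [pvLoopA, pvPass2]
      have hget : l[(m + 3 : Nat)]? = some l[m + 3] := List.getElem?_eq_getElem hlt
      have e1 : ((m + 3 : Nat) : Int) - 2 = ((m + 1 : Nat) : Int) := by push_cast; ring
      have e2 : ((m + 3 : Nat) : Int) - 1 = ((m + 2 : Nat) : Int) := by push_cast; ring
      have e3 : ((m + 3 : Nat) : Int) - 3 = (m : Int) := by push_cast; ring
      simp only [if_pos hlt]
      simp only [PySem.List.pyGet?_natCast, hget, List.cons_append, List.nil_append]
      rw [e1, e2, e3]
      by_cases hA : pvAllUnique [l[m], l[m + 1], l[m + 2], l[m + 3]] = true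
      · rw [if_pos hA, if_pos ((pvCond_equiv l m hlt).mp hA)]
      · rw [if_neg hA, if_neg (fun hB => hA ((pvCond_equiv l m hlt).mpr hB))]
        have := ih (m + 1) (by omega) (by omega)
        have e4 : m + 1 + 1 = m + 2 := by omega
        have e5 : m + 1 + 2 = m + 3 := by omega
        have e6 : m + 1 + 3 = m + 3 + 1 := by omega
        simp only [e4, e5, e6] at this
        simpa [List.drop] using this
    · have hle : l.length ≤ m + 3 := by omega
      rw [pvLoopA, pvPass2]
      simp [pvPass1_length, Nat.not_lt.mpr hle]

-- ===== VERDICT (by name: the statement is the Claim_ definition above) =====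
theorem chars_processed_spec : Claim_equal_chars_processed := by
  intro datastream _
  unfold Spec_chars_processed chars_processed chars_processed_alt
  simp only [PySem.List.slice_to_natCast]
  match hl : datastream.toList with
  | [] => rw [pvLoopA, pvPass2]; simp
  | [a] => rw [pvLoopA, pvPass2]; simp [pvPass1_length]
  | [a, b] => rw [pvLoopA, pvPass2]; simp [pvPass1_length]
  | [a, b, c] => rw [pvLoopA, pvPass2]; simp [pvPass1_length]
  | a :: b :: c :: d :: rest =>
    have hm : (0 : Nat) + 2 < (a :: b :: c :: d :: rest).length := by simp
    have := pvLoop_agree (a :: b :: c :: d :: rest) ((a :: b :: c :: d :: rest).length) 0 (by omega) hm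
    simpa [List.take] using this
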